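-- pv_equiv track=rewrite | github.com/MrBrantCode/unitest_baseline | mut_generate/mist_train_cf/cf_12502/solution.py | extract_word_in_parentheses
-- ===== SOURCE A (Python) =====
-- def extract_word_in_parentheses(text, word):
--     """
--     This function takes a text and a word as input, and returns a list of all instances
--     of the given word that are enclosed within parentheses in the text.
--
--     Args:
--         text (str): The input text to search for the word.
--         word (str): The word to search for in the text.
--
--     Returns:
--         list: A list of instances of the word enclosed within parentheses.
--     """
--
--     result = []
--     start = 0
--     while True:
--         start = text.find('(', start)
--         if start == -1:
--             break
--         end = text.find(')', start)
--         if end == -1: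
--             break
--         if word in text[start+1:end]:
--             result.append(word)
--         start = end + 1
--
--     return result
-- ===== SOURCE B (Python) =====
-- def extract_word_in_parentheses(text, word):
--     """Single left-to-right character pass with a state flag, instead of repeated str.find scans."""
--     result = []
--     in_paren = False
--     segment = ''
--     for ch in text:
--         if not in_paren:
--             if ch == '(':
--                 in_paren = True
--                 segment = ''
--         elif ch == ')':
--             if word in segment:
--                 result.append(word)
--             in_paren = False
--         else:
--             segment += ch
--     return result
-- ===== Notes on version B (the rewrite author's own statement) =====
-- stated objective: simpler
-- what changed: Replaced the repeated str.find('(')/str.find(')')+slicing loop by a single left-to-right character pass with an in_paren flag and a segment accumulator.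
import Mathlib
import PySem

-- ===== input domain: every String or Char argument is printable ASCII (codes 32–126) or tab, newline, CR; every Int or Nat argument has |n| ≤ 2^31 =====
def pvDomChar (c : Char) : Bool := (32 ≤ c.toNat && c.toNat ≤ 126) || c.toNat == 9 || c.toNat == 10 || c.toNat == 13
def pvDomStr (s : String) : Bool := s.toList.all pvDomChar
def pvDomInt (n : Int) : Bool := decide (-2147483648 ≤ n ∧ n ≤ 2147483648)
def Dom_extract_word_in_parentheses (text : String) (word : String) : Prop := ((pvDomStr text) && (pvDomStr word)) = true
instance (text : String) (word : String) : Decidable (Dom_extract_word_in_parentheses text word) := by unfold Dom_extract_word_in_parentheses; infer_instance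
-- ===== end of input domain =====

-- B replaces A's repeated str.find('(')/str.find(')') scans and slicing by one left-to-right
-- character pass with an in_paren flag and a segment accumulator (objective: simpler).

-- ===== PORT A =====
-- A's while loop: start = text.find('(', start); end = text.find(')', start);
-- test `word in text[start+1:end]`; continue at end+1.  The fuel parameter (length+1) is a
-- totality device only: start strictly increases each iteration, so fuel never runs out.
def pvAloop (cs : List Char) (word : String) : Nat → Nat → List String
  | 0, _ => []
  | fuel + 1, start =>
    if PySem.Chars.findFrom cs ['('] (start : Int) none = -1 then []
    else
      if PySem.Chars.findFrom cs [')'] (PySem.Chars.findFrom cs ['('] (start : Int) none) none = -1 then []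
      else
        (if PySem.Chars.isIn word.toList
              (PySem.Chars.slice cs (some (PySem.Chars.findFrom cs ['('] (start : Int) none + 1))
                (some (PySem.Chars.findFrom cs [')'] (PySem.Chars.findFrom cs ['('] (start : Int) none) none)))
          then [word] else [])
          ++ pvAloop cs word fuel ((PySem.Chars.findFrom cs [')'] (PySem.Chars.findFrom cs ['('] (start : Int) none) none).toNat + 1)

def extract_word_in_parentheses (text : String) (word : String) : List String :=
  pvAloop text.toList word (text.toList.length + 1) 0

-- ===== PORT B =====
-- Source B's single pass: state Out (not inside parentheses) / In (inside, carrying the segment so far).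
def pvB (word : String) : List Char → Option (List Char) → List String
  | [], _ => []
  | c :: rest, none => if c = '(' then pvB word rest (some []) else pvB word rest none
  | c :: rest, some seg =>
      if c = ')' then
        (if PySem.Chars.isIn word.toList seg then [word] else []) ++ pvB word rest none
      else pvB word rest (some (seg ++ [c]))

def extract_word_in_parentheses_alt (text : String) (word : String) : List String :=
  pvB word text.toList none

-- ===== PRECONDITION & SPEC =====
def Spec_extract_word_in_parentheses (text : String) (word : String) (out : List String) : Prop := out = extract_word_in_parentheses_alt text word
instance (text : String) (word : String) (out : List String) : Decidable (Spec_extract_word_in_parentheses text word out) := by unfold Spec_extract_word_in_parentheses; infer_instance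

-- ===== CLAIM (what is proved, stated in full; the proofs are below) =====
def Claim_equal_extract_word_in_parentheses : Prop := ∀ (text : String) (word : String), Dom_extract_word_in_parentheses text word → Spec_extract_word_in_parentheses text word (extract_word_in_parentheses text word)

-- ===== LEMMAS AND PROOFS =====

lemma pv_mem_infix {c : Char} {l : List Char} (h : c ∈ l) : [c] <:+: l := by
  rcases List.append_of_mem h with ⟨s, t, rfl⟩
  exact ⟨s, t, by simp⟩

lemma pvBOut_no_paren (word : String) {t : List Char} (h : '(' ∉ t) :
    pvB word t none = [] := by
  induction t with
  | nil => rfl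
  | cons c rest ih =>
      rw [pvB, if_neg (fun hc => h (by rw [hc]; exact List.mem_cons_self ..))]
      exact ih (fun hm => h (List.mem_cons_of_mem _ hm))

lemma pvBOut_append (word : String) {p : List Char} (t : List Char) (h : '(' ∉ p) :
    pvB word (p ++ t) none = pvB word t none := by
  induction p with
  | nil => rfl
  | cons c rest ih =>
      simp only [List.cons_append]
      rw [pvB, if_neg (fun hc => h (by rw [hc]; exact List.mem_cons_self ..))]
      exact ih (fun hm => h (List.mem_cons_of_mem _ hm))

lemma pvBIn_no_close (word : String) {t : List Char} (seg : List Char) (h : ')' ∉ t) :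
    pvB word t (some seg) = [] := by
  induction t generalizing seg with
  | nil => rfl
  | cons c rest ih =>
      rw [pvB, if_neg (fun hc => h (by rw [hc]; exact List.mem_cons_self ..))]
      exact ih _ (fun hm => h (List.mem_cons_of_mem _ hm))

lemma pvBIn_append (word : String) {p : List Char} (t : List Char) (seg : List Char)
    (h : ')' ∉ p) :
    pvB word (p ++ ')' :: t) (some seg) =
      (if PySem.Chars.isIn word.toList (seg ++ p) then [word] else []) ++ pvB word t none := by
  induction p generalizing seg with
  | nil => simp [pvB]
  | cons c rest ih =>
      simp only [List.cons_append]
      rw [pvB, if_neg (fun hc => h (by rw [hc]; exact List.mem_cons_self ..))]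
      rw [ih _ (fun hm => h (List.mem_cons_of_mem _ hm))]
      simp

lemma pv_main (word : String) :
    ∀ (fuel : Nat) (cs : List Char) (start : Nat), start ≤ cs.length → cs.length < start + fuel →
      pvAloop cs word fuel start = pvB word (cs.drop start) none := by
  intro fuel
  induction fuel with
  | zero => intro cs start hs hn; omega
  | succ n ih =>
      intro cs start hs hn
      rw [pvAloop]
      set i := PySem.Chars.findFrom cs ['('] (start : Int) none with hidef
      by_cases hi : i = -1
      · rw [if_pos hi]
        have hnotin : '(' ∉ cs.drop start := by
          intro hmem
          exact ((PySem.Chars.findFrom_natCast_eq_neg_one_iff cs ['('] start hs).mp (by rw [← hidef]; exact hi))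
            (pv_mem_infix hmem)
        exact (pvBOut_no_paren word hnotin).symm
      · rw [if_neg hi]
        have hspec1 := PySem.Chars.findFrom_natCast_spec cs ['('] start hs (by rw [← hidef]; exact hi)
        rw [← hidef] at hspec1
        obtain ⟨hle1, hpre1, hmin1⟩ := hspec1
        have hi0 : (0:Int) ≤ i := le_trans (by exact_mod_cast Nat.zero_le start) hle1
        have hicast : ((i.toNat : Nat) : Int) = i := Int.toNat_of_nonneg hi0
        have hstart_le : start ≤ i.toNat := by omega
        obtain ⟨t1, ht1⟩ := hpre1
        have hil : i.toNat < cs.length := by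
          have h := congrArg List.length ht1
          simp at h; omega
        have hgi : cs[i.toNat]'hil = '(' := by
          have h := ht1
          rw [List.drop_eq_getElem_cons hil] at h
          simp only [List.singleton_append] at h
          exact ((List.cons_eq_cons.mp h).1).symm
        have hdropi : cs.drop i.toNat = '(' :: cs.drop (i.toNat + 1) := by
          conv_lhs => rw [List.drop_eq_getElem_cons hil]
          rw [hgi]
        -- the stretch between start and the first '(' contains no '('
        have hpre_no : '(' ∉ (cs.drop start).take (i.toNat - start) := by
          intro hmem
          obtain ⟨m, hm, he⟩ := List.mem_iff_getElem.mp hmem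
          have hmlt : m < i.toNat - start := by
            simp [List.length_take, List.length_drop] at hm; omega
          have he2 : cs[start + m]'(by omega) = '(' := by
            simpa [List.getElem_take, List.getElem_drop] using he
          have hdm : cs.drop (start + m) = '(' :: cs.drop (start + m + 1) := by
            conv_lhs => rw [List.drop_eq_getElem_cons (show start + m < cs.length by omega)]
            rw [he2]
          refine hmin1 (start + m) (by omega) (by omega) ?_
          rw [hdm]
          exact ⟨_, rfl⟩
        have hsplit : cs.drop start = (cs.drop start).take (i.toNat - start) ++ cs.drop i.toNat := by
          conv_lhs => rw [← List.take_append_drop (i.toNat - start) (cs.drop start)]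
          rw [List.drop_drop]
          congr 2
          omega
        have hB1 : pvB word (cs.drop start) none = pvB word (cs.drop (i.toNat + 1)) (some []) := by
          conv_lhs => rw [hsplit]
          rw [pvBOut_append word _ hpre_no, hdropi, pvB, if_pos rfl]
        set j := PySem.Chars.findFrom cs [')'] i none with hjdef
        by_cases hj : j = -1
        · rw [if_pos hj]
          have hnoc : ')' ∉ cs.drop i.toNat := by
            intro hmem
            have h := (PySem.Chars.findFrom_natCast_eq_neg_one_iff cs [')'] i.toNat (le_of_lt hil)).mp
              (by rw [hicast, ← hjdef]; exact hj)
            exact h (pv_mem_infix hmem)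
          have hnoc1 : ')' ∉ cs.drop (i.toNat + 1) := by
            intro hmem
            exact hnoc (by rw [hdropi]; exact List.mem_cons_of_mem _ hmem)
          rw [hB1, pvBIn_no_close word [] hnoc1]
        · rw [if_neg hj]
          have hspec2 := PySem.Chars.findFrom_natCast_spec cs [')'] i.toNat (le_of_lt hil)
            (by rw [hicast, ← hjdef]; exact hj)
          rw [hicast, ← hjdef] at hspec2
          obtain ⟨hle2, hpre2, hmin2⟩ := hspec2
          have hj0 : (0:Int) ≤ j := le_trans hi0 (by rw [← hicast] at hle2 ⊢; exact_mod_cast hle2)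
          have hjcast : ((j.toNat : Nat) : Int) = j := Int.toNat_of_nonneg hj0
          obtain ⟨t2, ht2⟩ := hpre2
          have hjl : j.toNat < cs.length := by
            have h := congrArg List.length ht2
            simp at h; omega
          have hgj : cs[j.toNat]'hjl = ')' := by
            have h := ht2
            rw [List.drop_eq_getElem_cons hjl] at h
            simp only [List.singleton_append] at h
            exact ((List.cons_eq_cons.mp h).1).symm
          have hij_le : i.toNat ≤ j.toNat := by omega
          have hij : i.toNat + 1 ≤ j.toNat := by
            rcases Nat.eq_or_lt_of_le hij_le with heq | hlt
            · exfalso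
              have h := ht2
              rw [← heq, hdropi] at h
              simp only [List.singleton_append] at h
              exact absurd (List.cons_eq_cons.mp h).1 (by decide)
            · omega
          have hdropj : cs.drop j.toNat = ')' :: cs.drop (j.toNat + 1) := by
            conv_lhs => rw [List.drop_eq_getElem_cons hjl]
            rw [hgj]
          -- the segment between '(' and the first ')' contains no ')'
          have hseg_no : ')' ∉ (cs.drop (i.toNat + 1)).take (j.toNat - (i.toNat + 1)) := by
            intro hmem
            obtain ⟨m, hm, he⟩ := List.mem_iff_getElem.mp hmem
            have hmlt : m < j.toNat - (i.toNat + 1) := by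
              simp [List.length_take, List.length_drop] at hm; omega
            have he2 : cs[i.toNat + 1 + m]'(by omega) = ')' := by
              simpa [List.getElem_take, List.getElem_drop] using he
            have hdm : cs.drop (i.toNat + 1 + m) = ')' :: cs.drop (i.toNat + 1 + m + 1) := by
              conv_lhs => rw [List.drop_eq_getElem_cons (show i.toNat + 1 + m < cs.length by omega)]
              rw [he2]
            refine hmin2 (i.toNat + 1 + m) (by omega) (by omega) ?_
            rw [hdm]
            exact ⟨_, rfl⟩
          have hsplit2 : cs.drop (i.toNat + 1) =
              (cs.drop (i.toNat + 1)).take (j.toNat - (i.toNat + 1)) ++ cs.drop j.toNat := by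
            conv_lhs => rw [← List.take_append_drop (j.toNat - (i.toNat + 1)) (cs.drop (i.toNat + 1))]
            rw [List.drop_drop]
            congr 2
            omega
          have hslice : PySem.Chars.slice cs (some (i + 1)) (some j) =
              (cs.drop (i.toNat + 1)).take (j.toNat - (i.toNat + 1)) := by
            rw [← hicast, ← hjcast]
            have hcast1 : ((i.toNat : Int) + 1) = ((i.toNat + 1 : Nat) : Int) := by push_cast; ring
            rw [hcast1]
            rw [PySem.Chars.slice_eq_listSlice, PySem.List.slice_natCast]
            simp only [Int.toNat_natCast]
          have hB3 : pvB word (cs.drop (i.toNat + 1)) (some []) =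
              (if PySem.Chars.isIn word.toList ((cs.drop (i.toNat + 1)).take (j.toNat - (i.toNat + 1))) then [word] else [])
                ++ pvB word (cs.drop (j.toNat + 1)) none := by
            conv_lhs => rw [hsplit2, hdropj]
            rw [pvBIn_append word _ [] hseg_no]
            simp
          have hIH := ih cs (j.toNat + 1) (by omega) (by omega)
          rw [hslice, hIH, hB1, hB3]

-- ===== VERDICT (by name: the statement is the Claim_ definition above) =====
theorem extract_word_in_parentheses_spec : Claim_equal_extract_word_in_parentheses := by
  intro text word _
  unfold Spec_extract_word_in_parentheses extract_word_in_parentheses extract_word_in_parentheses_alt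
  rw [pv_main word (text.toList.length + 1) text.toList 0 (by omega) (by omega)]
  simp
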